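-- pv_equiv track=rewrite | github.com/lauriebelch/GLADE | scripts/ConvertFiles.py | convert_leaf
-- ===== SOURCE A (Python) =====
-- def convert_leaf(full_leaf, SpeciesDict, SequenceIDsDict):
--     """
--     Convert a leaf from a gene tree.
--     Species names and gene IDs may contain underscores
--     so identify species by checking which SpeciesDict key
--     is the longest matching prefix of the leaf.
--     """
--     matches = []
--     for species in SpeciesDict.keys():
--         prefix = species + "_"
--         if full_leaf.startswith(prefix):
--             matches.append(species)
--     # No species match → internal node (e.g., "n1")
--     if not matches:
--         return full_leaf
--     # Choose longest match to avoid partial species names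
--     species = max(matches, key=len)
--     # Extract gene ID (everything after "<species>_")
--     gene = full_leaf[len(species) + 1:]
--     species_code = SpeciesDict[species]
--     if gene not in SequenceIDsDict[species_code]:
--         raise KeyError(
--             f"Gene '{gene}' not found for species '{species}' (code={species_code}). "
--             f"Full leaf: '{full_leaf}'"
--         )
--     return SequenceIDsDict[species_code][gene]
-- ===== SOURCE B (Python) =====
-- def convert_leaf(full_leaf, SpeciesDict, SequenceIDsDict):
--     """
--     Convert a leaf from a gene tree.
--     Instead of scanning every species key, walk the underscore positions of
--     the leaf from the right (longest candidate prefix first) and test each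
--     candidate with a single dict lookup.
--     """
--     for i in range(len(full_leaf) - 1, -1, -1):
--         if full_leaf[i] == "_" and full_leaf[:i] in SpeciesDict:
--             species = full_leaf[:i]
--             gene = full_leaf[i + 1:]
--             species_code = SpeciesDict[species]
--             inner = SequenceIDsDict[species_code]
--             if gene not in inner:
--                 raise KeyError(
--                     f"Gene '{gene}' not found for species '{species}' (code={species_code}). "
--                     f"Full leaf: '{full_leaf}'"
--                 )
--             return inner[gene]
--     # No species match -> internal node (e.g., "n1")
--     return full_leaf
-- ===== Notes on version B (the rewrite author's own statement) =====
-- stated objective: alternative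
-- what changed: A tests every species key for being an underscore-terminated prefix of the leaf and then takes the longest match; B instead walks the leaf's underscore positions from the right (longest candidate prefix first) and tests each candidate with a single dict lookup, so the species dictionary is never scanned.
import Mathlib
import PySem

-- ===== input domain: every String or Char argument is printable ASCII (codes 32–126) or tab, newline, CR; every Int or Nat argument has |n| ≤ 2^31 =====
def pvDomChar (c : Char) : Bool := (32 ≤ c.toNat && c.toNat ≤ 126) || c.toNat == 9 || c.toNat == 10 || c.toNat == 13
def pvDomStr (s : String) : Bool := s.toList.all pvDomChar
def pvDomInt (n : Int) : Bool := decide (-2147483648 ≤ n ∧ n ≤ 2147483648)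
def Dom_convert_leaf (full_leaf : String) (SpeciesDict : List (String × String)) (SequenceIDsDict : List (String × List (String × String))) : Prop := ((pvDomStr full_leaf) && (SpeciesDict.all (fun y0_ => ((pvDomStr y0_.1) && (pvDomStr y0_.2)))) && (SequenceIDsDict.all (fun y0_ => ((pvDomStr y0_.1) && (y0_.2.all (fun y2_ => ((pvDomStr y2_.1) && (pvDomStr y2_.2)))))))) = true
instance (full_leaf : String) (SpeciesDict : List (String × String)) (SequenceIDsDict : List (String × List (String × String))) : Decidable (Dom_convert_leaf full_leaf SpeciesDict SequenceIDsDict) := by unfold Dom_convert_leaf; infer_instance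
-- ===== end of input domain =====

-- B replaces A's scan of every species key (collect all prefix matches, take the longest)
-- by a scan of the leaf's underscore positions from the right, longest candidate prefix
-- first, each tested with one dict lookup; objective: alternative (no speed claim).

-- Python dict lookup (first match in the association list), keyed by the characters of the key.
def pvLookup {β : Type} (d : List (String × β)) (k : List Char) : Option β :=
  match d with
  | [] => none
  | (s, v) :: rest => if s.toList = k then some v else pvLookup rest k

-- ===== PORT A =====
def convert_leaf (full_leaf : String) (SpeciesDict : List (String × String)) (SequenceIDsDict : List (String × List (String × String))) : String :=
  -- `if not matches: return full_leaf` and `max(matches, key=len)` (max? is none exactly on [])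
  match PySem.List.max?
      (SpeciesDict.foldl
        (fun acc kv => if PySem.Chars.startswith full_leaf.toList (kv.1.toList ++ ['_']) then acc ++ [kv.1.toList] else acc) [])
      PySem.List.len with
  | none => full_leaf
  | some species =>
    let gene := PySem.List.slice full_leaf.toList (some (PySem.List.len species + 1)) none   -- full_leaf[len(species)+1:]
    match pvLookup SpeciesDict species with
    | none => ""        -- unreachable: species is a key of SpeciesDict
    | some code =>
      match pvLookup SequenceIDsDict code.toList with
      | none => ""      -- Python: KeyError (excluded by Pre_)
      | some inner =>
        match pvLookup inner gene with
        | none => ""    -- Python: explicit `raise KeyError` (excluded by Pre_)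
        | some out => out

-- ===== PORT B =====
-- body of the loop: the candidate prefix ending just before position i
def pvStep (full : List Char) (SpeciesDict : List (String × String)) (SequenceIDsDict : List (String × List (String × String))) (i : Nat) : Option String :=
  if full[i]? = some '_' then
    match pvLookup SpeciesDict (full.take i) with
    | none => none
    | some code =>
      some (match pvLookup SequenceIDsDict code.toList with
            | none => ""    -- Python: KeyError (excluded by Pre_)
            | some inner =>
              match pvLookup inner (full.drop (i + 1)) with
              | none => ""  -- Python: explicit `raise KeyError` (excluded by Pre_)
              | some out => out)
  else none

-- `for i in range(len(full_leaf)-1, -1, -1)` with early return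
def pvScan (full_leaf : String) (full : List Char) (SpeciesDict : List (String × String)) (SequenceIDsDict : List (String × List (String × String))) : Nat → String
  | 0 => (pvStep full SpeciesDict SequenceIDsDict 0).getD full_leaf
  | i + 1 =>
    match pvStep full SpeciesDict SequenceIDsDict (i + 1) with
    | some r => r
    | none => pvScan full_leaf full SpeciesDict SequenceIDsDict i

def convert_leaf_alt (full_leaf : String) (SpeciesDict : List (String × String)) (SequenceIDsDict : List (String × List (String × String))) : String :=
  if full_leaf.toList.length = 0 then full_leaf
  else pvScan full_leaf full_leaf.toList SpeciesDict SequenceIDsDict (full_leaf.toList.length - 1)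

-- ===== PRECONDITION & SPEC =====
-- position i of the leaf is an underscore and the text before it is a species key
def pvHit (full : List Char) (SpeciesDict : List (String × String)) (i : Nat) : Bool :=
  (full[i]? == some '_') && SpeciesDict.any (fun p => p.1.toList == full.take i)

-- A raises KeyError when a species key matches but the species code is missing from
-- SequenceIDsDict or the gene id is missing from its table; Pre_ excludes exactly those
-- inputs (at the longest matching prefix, the species code and the gene id must be present).
def Pre_convert_leaf (full_leaf : String) (SpeciesDict : List (String × String)) (SequenceIDsDict : List (String × List (String × String))) : Prop :=
  ∀ i, i < full_leaf.toList.length → pvHit full_leaf.toList SpeciesDict i = true →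
    (∀ j, j < full_leaf.toList.length → i < j → ¬ pvHit full_leaf.toList SpeciesDict j = true) →
    -- i.e. for the matching species pair, its code has a gene table containing the gene id
    (SpeciesDict.all (fun p => !(p.1.toList == full_leaf.toList.take i) ||
      SequenceIDsDict.any (fun q => (q.1 == p.2) &&
        q.2.any (fun r => r.1.toList == full_leaf.toList.drop (i + 1))))) = true
instance (full_leaf : String) (SpeciesDict : List (String × String)) (SequenceIDsDict : List (String × List (String × String))) : Decidable (Pre_convert_leaf full_leaf SpeciesDict SequenceIDsDict) := by unfold Pre_convert_leaf; infer_instance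

def pvWitness_convert_leaf : String × (List (String × String)) × (List (String × List (String × String))) :=
  ("pan_trog_g1", [("pan", "P1"), ("pan_trog", "P2")], [("P1", [("g", "x")]), ("P2", [("g1", "PT_001")])])

def Spec_convert_leaf (full_leaf : String) (SpeciesDict : List (String × String)) (SequenceIDsDict : List (String × List (String × String))) (out : String) : Prop := out = convert_leaf_alt full_leaf SpeciesDict SequenceIDsDict
instance (full_leaf : String) (SpeciesDict : List (String × String)) (SequenceIDsDict : List (String × List (String × String))) (out : String) : Decidable (Spec_convert_leaf full_leaf SpeciesDict SequenceIDsDict out) := by unfold Spec_convert_leaf; infer_instance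

-- ===== CLAIM (what is proved, stated in full; the proofs are below) =====
def Claim_equal_convert_leaf : Prop := ∀ (full_leaf : String) (SpeciesDict : List (String × String)) (SequenceIDsDict : List (String × List (String × String))), Dom_convert_leaf full_leaf SpeciesDict SequenceIDsDict → Pre_convert_leaf full_leaf SpeciesDict SequenceIDsDict → Spec_convert_leaf full_leaf SpeciesDict SequenceIDsDict (convert_leaf full_leaf SpeciesDict SequenceIDsDict)

-- ===== LEMMAS AND PROOFS =====

theorem pvLookup_isSome_iff {β : Type} (d : List (String × β)) (k : List Char) :
    (pvLookup d k).isSome = true ↔ ∃ p ∈ d, p.1.toList = k := by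
  induction d with
  | nil => simp [pvLookup]
  | cons hd tl ih =>
    obtain ⟨s, v⟩ := hd
    by_cases h : s.toList = k <;> simp [pvLookup, h, ih]

theorem pvPrefix_iff (full s : List Char) :
    (s ++ ['_']) <+: full ↔ full[s.length]? = some '_' ∧ full.take s.length = s := by
  constructor
  · rintro ⟨t, rfl⟩
    rw [List.append_assoc]
    refine ⟨?_, List.take_left⟩
    rw [List.getElem?_append_right (le_refl s.length)]
    simp
  · rintro ⟨h1, h2⟩
    have : s ++ ['_'] = full.take (s.length + 1) := by
      rw [List.take_add_one, h2, h1]; rfl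
    rw [this]
    exact List.take_prefix _ _

theorem pvMem_matches_iff (full : List Char) (Sp : List (String × String)) (s : List Char) :
    s ∈ Sp.foldl (fun acc kv => if PySem.Chars.startswith full (kv.1.toList ++ ['_']) then acc ++ [kv.1.toList] else acc) [] ↔
      (∃ p ∈ Sp, p.1.toList = s) ∧ (s ++ ['_']) <+: full := by
  rw [PySem.List.foldl_append_if]
  simp only [List.nil_append, List.mem_map, List.mem_filter]
  constructor
  · rintro ⟨kv, ⟨hmem, hpre⟩, rfl⟩
    refine ⟨⟨kv, hmem, rfl⟩, ?_⟩
    simpa [PySem.Chars.startswith] using hpre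
  · rintro ⟨⟨kv, hmem, rfl⟩, hpre⟩
    exact ⟨kv, ⟨hmem, by simpa [PySem.Chars.startswith] using hpre⟩, rfl⟩

theorem pvHit_iff (full : List Char) (Sp : List (String × String)) (i : Nat) :
    pvHit full Sp i = true ↔
      full[i]? = some '_' ∧ ∃ p ∈ Sp, p.1.toList = full.take i := by
  simp [pvHit]

theorem pvScan_of_none (full_leaf : String) (full : List Char) (Sp : List (String × String)) (Sq : List (String × List (String × String))) (i : Nat)
    (h : ∀ j, j ≤ i → pvStep full Sp Sq j = none) :
    pvScan full_leaf full Sp Sq i = full_leaf := by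
  induction i with
  | zero => simp [pvScan, h 0 (le_refl 0)]
  | succ n ih => simp [pvScan, h (n+1) (le_refl _), ih (fun j hj => h j (le_trans hj (Nat.le_succ n)))]

theorem pvScan_of_some (full_leaf : String) (full : List Char) (Sp : List (String × String)) (Sq : List (String × List (String × String)))
    (k : Nat) (r : String) (hk : pvStep full Sp Sq k = some r) :
    ∀ i, k ≤ i → (∀ j, k < j → j ≤ i → pvStep full Sp Sq j = none) →
      pvScan full_leaf full Sp Sq i = r := by
  intro i
  induction i with
  | zero =>
    intro hki _
    have : k = 0 := Nat.le_zero.mp hki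
    subst this
    simp [pvScan, hk]
  | succ n ih =>
    intro hki hnone
    by_cases hkn : k = n + 1
    · subst hkn; simp [pvScan, hk]
    · have hkle : k ≤ n := Nat.lt_succ_iff.mp (lt_of_le_of_ne hki hkn)
      have h1 : pvStep full Sp Sq (n + 1) = none :=
        hnone (n + 1) (Nat.lt_succ_of_le hkle) (le_refl _)
      simp [pvScan, h1]
      exact ih hkle (fun j hj hj' => hnone j hj (le_trans hj' (Nat.le_succ n)))

theorem pvStep_eq_none_iff (full : List Char) (Sp : List (String × String)) (Sq : List (String × List (String × String))) (i : Nat) :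
    pvStep full Sp Sq i = none ↔ ¬ pvHit full Sp i = true := by
  have hiff := pvLookup_isSome_iff Sp (full.take i)
  unfold pvStep pvHit
  by_cases h : full[i]? = some '_'
  · rw [if_pos h]
    cases hl : pvLookup Sp (full.take i) <;>
      · rw [hl] at hiff
        simp at hiff
        simp [h, hiff]
        try exact hiff
  · simp [h]

-- ===== VERDICT (by name: the statement is the Claim_ definition above) =====
theorem convert_leaf_spec : Claim_equal_convert_leaf := by
  intro full_leaf Sp Sq _ _
  unfold Spec_convert_leaf convert_leaf convert_leaf_alt
  cases hm : PySem.List.max?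
      (Sp.foldl (fun acc kv => if PySem.Chars.startswith full_leaf.toList (kv.1.toList ++ ['_']) then acc ++ [kv.1.toList] else acc) [])
      PySem.List.len with
  | none =>
    have hnil := (PySem.List.max?_eq_none_iff _ _).mp hm
    have hnohit : ∀ i, ¬ pvHit full_leaf.toList Sp i = true := by
      intro i hi
      rw [pvHit_iff] at hi
      obtain ⟨hus, p, hp, hkey⟩ := hi
      have hlen : i < full_leaf.toList.length := (List.getElem?_eq_some_iff.mp hus).1
      have htl : (full_leaf.toList.take i).length = i := by rw [List.length_take]; omega
      have hmem : full_leaf.toList.take i ∈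
          (Sp.foldl (fun acc kv => if PySem.Chars.startswith full_leaf.toList (kv.1.toList ++ ['_']) then acc ++ [kv.1.toList] else acc) []) := by
        rw [pvMem_matches_iff]
        exact ⟨⟨p, hp, hkey⟩, by rw [pvPrefix_iff, htl]; exact ⟨hus, rfl⟩⟩
      rw [hnil] at hmem
      simp at hmem
    by_cases hz : full_leaf.toList.length = 0
    · simp [hz]
    · rw [if_neg hz]
      exact (pvScan_of_none _ _ _ _ _ (fun j _ => (pvStep_eq_none_iff _ _ _ _).mpr (hnohit j))).symm
  | some m =>
    have hmem := PySem.List.max?_mem hm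
    rw [pvMem_matches_iff] at hmem
    obtain ⟨⟨kv, hkv, hkey⟩, hpref⟩ := hmem
    rw [pvPrefix_iff] at hpref
    obtain ⟨hus, htake⟩ := hpref
    have hlt : m.length < full_leaf.toList.length := (List.getElem?_eq_some_iff.mp hus).1
    have hmax : ∀ y ∈ (Sp.foldl (fun acc kv => if PySem.Chars.startswith full_leaf.toList (kv.1.toList ++ ['_']) then acc ++ [kv.1.toList] else acc) []),
        y.length ≤ m.length := by
      intro y hy
      have := PySem.List.max?_isMax hm y hy
      simpa [PySem.List.len] using this
    have hcode0 : (pvLookup Sp m).isSome = true := (pvLookup_isSome_iff Sp m).mpr ⟨kv, hkv, hkey⟩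
    obtain ⟨code, hcode⟩ := Option.isSome_iff_exists.mp hcode0
    have hcode' : pvLookup Sp (full_leaf.toList.take m.length) = some code := by
      rw [htake]; exact hcode
    have hstep : pvStep full_leaf.toList Sp Sq m.length = some
        (match pvLookup Sq code.toList with
         | none => ""
         | some inner =>
           match pvLookup inner (full_leaf.toList.drop (m.length + 1)) with
           | none => ""
           | some out => out) := by
      unfold pvStep
      rw [if_pos hus, hcode']
    have hnone : ∀ j, m.length < j → pvStep full_leaf.toList Sp Sq j = none := by
      intro j hj
      rw [pvStep_eq_none_iff]
      intro hhit
      rw [pvHit_iff] at hhit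
      obtain ⟨hus', p, hp, hkey'⟩ := hhit
      have hjlt : j < full_leaf.toList.length := (List.getElem?_eq_some_iff.mp hus').1
      have htl : (full_leaf.toList.take j).length = j := by rw [List.length_take]; omega
      have hmem' : full_leaf.toList.take j ∈
          (Sp.foldl (fun acc kv => if PySem.Chars.startswith full_leaf.toList (kv.1.toList ++ ['_']) then acc ++ [kv.1.toList] else acc) []) := by
        rw [pvMem_matches_iff]
        exact ⟨⟨p, hp, hkey'⟩, by rw [pvPrefix_iff, htl]; exact ⟨hus', rfl⟩⟩
      have := hmax _ hmem'
      rw [htl] at this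
      omega
    have hz : ¬ full_leaf.toList.length = 0 := by omega
    rw [if_neg hz]
    rw [pvScan_of_some full_leaf full_leaf.toList Sp Sq m.length _ hstep
      (full_leaf.toList.length - 1) (by omega) (fun j hj _ => hnone j hj)]
    have hslice : PySem.List.slice full_leaf.toList (some (PySem.List.len m + 1)) none
        = full_leaf.toList.drop (m.length + 1) := by
      have h0 : PySem.List.len m + 1 = ((m.length + 1 : Nat) : Int) := by
        simp [PySem.List.len]
      rw [h0, PySem.List.slice_from full_leaf.toList
        (by omega : (0 : Int) ≤ ((m.length + 1 : Nat) : Int))]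
      simp
    simp only [hslice, hcode]
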